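-- pv_equiv track=rewrite | github.com/Utkarsh1012Dewan/Leetcode-Gfg-Solutions | 1605-minimum-number-of-days-to-make-m-bouquets/1605-minimum-number-of-days-to-make-m-bouquets.py | possible
-- ===== SOURCE A (Python) =====
-- def possible(arr,mid,m,k):
--     count = 0
--     bouquet = 0
--
--     for i in range(len(arr)):
--         if arr[i] <= mid:
--             count+=1
--         else:
--             bouquet += count//k
--             count = 0
--     bouquet += count//k
--     return bouquet >= m
-- ===== SOURCE B (Python) =====
-- def possible(arr, mid, m, k):
--     # Two-phase: extract maximal runs of available flowers, then reduce.
--     runs = []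
--     i, n = 0, len(arr)
--     while i < n:
--         if arr[i] <= mid:
--             j = i + 1
--             while j < n and arr[j] <= mid:
--                 j += 1
--             runs.append(j - i)
--             i = j
--         else:
--             i += 1
--     return sum(r // k for r in runs) >= m
-- ===== Notes on version B (the rewrite author's own statement) =====
-- stated objective: alternative
-- what changed: B first extracts the list of maximal runs of flowers available by day mid (an inner scan advancing past each run) and then sums run//k in a separate reduction, instead of A's single pass with an inline count-and-reset accumulator.
import Mathlib
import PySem

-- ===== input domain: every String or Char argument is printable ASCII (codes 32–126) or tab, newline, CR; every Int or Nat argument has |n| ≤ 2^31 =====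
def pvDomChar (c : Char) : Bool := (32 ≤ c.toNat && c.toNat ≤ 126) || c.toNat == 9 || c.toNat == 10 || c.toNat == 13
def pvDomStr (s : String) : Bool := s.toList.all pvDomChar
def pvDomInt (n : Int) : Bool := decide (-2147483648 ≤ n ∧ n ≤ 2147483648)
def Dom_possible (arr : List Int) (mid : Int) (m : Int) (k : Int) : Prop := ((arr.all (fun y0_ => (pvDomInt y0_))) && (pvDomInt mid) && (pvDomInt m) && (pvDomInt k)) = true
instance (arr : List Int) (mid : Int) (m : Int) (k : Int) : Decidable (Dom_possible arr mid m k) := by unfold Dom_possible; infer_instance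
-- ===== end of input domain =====

-- B extracts the maximal runs of available flowers first and sums run//k in a
-- separate reduction; A counts-and-resets inline. Alternative decomposition, same cost.

-- ===== PORT A =====
-- for i in range(len(arr)) with arr[i]: indices are always in range, so pyGetD is exact
def possible (arr : List Int) (mid : Int) (m : Int) (k : Int) : Bool :=
  let s := (PySem.List.pyRange 0 (PySem.List.len arr) 1).foldl
    (fun (s : Int × Int) i =>
      if PySem.List.pyGetD arr i 0 ≤ mid then (s.1 + 1, s.2)
      else (0, s.2 + PySem.Int.floordiv s.1 k)) (0, 0)
  decide (s.2 + PySem.Int.floordiv s.1 k ≥ m)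

-- ===== PORT B =====
-- the outer while loop of Source B: emit each maximal run's length, skip past it
def pvRunsB (mid : Int) : List Int → List Nat
  | [] => []
  | x :: xs =>
    if x ≤ mid then
      ((xs.takeWhile (fun y => decide (y ≤ mid))).length + 1)
        :: pvRunsB mid (xs.dropWhile (fun y => decide (y ≤ mid)))
    else pvRunsB mid xs
  termination_by l => l.length
  decreasing_by
    · exact Nat.lt_succ_of_le (List.length_dropWhile_le _ _)
    · simp

def possible_alt (arr : List Int) (mid : Int) (m : Int) (k : Int) : Bool :=
  decide (((pvRunsB mid arr).map (fun r => PySem.Int.floordiv (r : Int) k)).sum ≥ m)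

-- ===== PRECONDITION & SPEC =====
-- Pre_ excludes exactly k = 0, on which A raises ZeroDivisionError
def Pre_possible (arr : List Int) (mid : Int) (m : Int) (k : Int) : Prop := k ≠ 0
instance (arr : List Int) (mid : Int) (m : Int) (k : Int) : Decidable (Pre_possible arr mid m k) := by unfold Pre_possible; infer_instance
def pvWitness_possible : List Int × Int × Int × Int := ([1, 10, 2, 3], 3, 1, 2)

def Spec_possible (arr : List Int) (mid : Int) (m : Int) (k : Int) (out : Bool) : Prop := out = possible_alt arr mid m k
instance (arr : List Int) (mid : Int) (m : Int) (k : Int) (out : Bool) : Decidable (Spec_possible arr mid m k out) := by unfold Spec_possible; infer_instance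

-- ===== CLAIM (what is proved, stated in full; the proofs are below) =====
def Claim_equal_possible : Prop := ∀ (arr : List Int) (mid : Int) (m : Int) (k : Int), Dom_possible arr mid m k → Pre_possible arr mid m k → Spec_possible arr mid m k (possible arr mid m k)

-- ===== LEMMAS AND PROOFS =====

def pvFin (mid k : Int) (l : List Int) (s0 : Int × Int) : Int :=
  let s := l.foldl
    (fun (s : Int × Int) x =>
      if x ≤ mid then (s.1 + 1, s.2) else (0, s.2 + PySem.Int.floordiv s.1 k)) s0
  s.2 + PySem.Int.floordiv s.1 k

def pvSum (mid k : Int) (l : List Int) : Int :=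
  ((pvRunsB mid l).map (fun r => PySem.Int.floordiv (r : Int) k)).sum

lemma pvFin_cons_pos (mid k x c b : Int) (xs : List Int) (h : x ≤ mid) :
    pvFin mid k (x :: xs) (c, b) = pvFin mid k xs (c + 1, b) := by
  simp [pvFin, h]

lemma pvFin_cons_neg (mid k x c b : Int) (xs : List Int) (h : ¬ x ≤ mid) :
    pvFin mid k (x :: xs) (c, b) = pvFin mid k xs (0, b + PySem.Int.floordiv c k) := by
  simp [pvFin, h]

lemma pvSum_cons_neg (mid k x : Int) (xs : List Int) (h : ¬ x ≤ mid) :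
    pvSum mid k (x :: xs) = pvSum mid k xs := by
  simp [pvSum, pvRunsB, h]

lemma pvSum_unfold (mid k : Int) (l : List Int) :
    pvSum mid k l = PySem.Int.floordiv ((l.takeWhile (fun y => decide (y ≤ mid))).length : Int) k
      + pvSum mid k (l.dropWhile (fun y => decide (y ≤ mid))) := by
  cases l with
  | nil => simp [pvSum, pvRunsB, PySem.Int.floordiv]
  | cons x xs =>
    by_cases h : x ≤ mid
    · simp [pvSum, pvRunsB, h]
    · simp [pvSum_cons_neg mid k x xs h, h, PySem.Int.floordiv]

lemma pvLoop_eq (mid k : Int) : ∀ (l : List Int) (c b : Int),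
    pvFin mid k l (c, b)
      = b + PySem.Int.floordiv (c + ((l.takeWhile (fun y => decide (y ≤ mid))).length : Int)) k
          + pvSum mid k (l.dropWhile (fun y => decide (y ≤ mid))) := by
  intro l
  induction l with
  | nil => intro c b; simp [pvFin, pvSum, pvRunsB]
  | cons x xs ih =>
    intro c b
    by_cases h : x ≤ mid
    · rw [pvFin_cons_pos mid k x c b xs h, ih (c + 1) b]
      simp only [List.takeWhile_cons, List.dropWhile_cons, h, decide_true, if_true]
      rw [show c + 1 + ((xs.takeWhile (fun y => decide (y ≤ mid))).length : Int)
            = c + (((x :: xs.takeWhile (fun y => decide (y ≤ mid))).length : Int)) by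
          push_cast [List.length_cons]; ring]
    · rw [pvFin_cons_neg mid k x c b xs h, ih 0 (b + PySem.Int.floordiv c k)]
      simp only [List.takeWhile_cons, List.dropWhile_cons, h, decide_false, Bool.false_eq_true,
        if_false, List.length_nil, Nat.cast_zero, add_zero, zero_add]
      rw [pvSum_cons_neg mid k x xs h, pvSum_unfold mid k xs]
      ring

lemma pv_main (arr : List Int) (mid m k : Int) :
    possible arr mid m k = possible_alt arr mid m k := by
  have hA : possible arr mid m k = decide (pvFin mid k arr (0, 0) ≥ m) := by
    unfold possible pvFin
    rw [PySem.List.len_eq]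
    rw [PySem.List.foldl_pyRange_zero_pyGetD' arr 0
      (fun (s : Int × Int) x =>
        if x ≤ mid then (s.1 + 1, s.2) else (0, s.2 + PySem.Int.floordiv s.1 k)) (0, 0)]
  have hB : possible_alt arr mid m k = decide (pvSum mid k arr ≥ m) := by
    unfold possible_alt pvSum
    rfl
  rw [hA, hB, pvLoop_eq mid k arr 0 0, pvSum_unfold mid k arr]
  simp

-- ===== VERDICT (by name: the statement is the Claim_ definition above) =====
theorem possible_spec : Claim_equal_possible := by
  intro arr mid m k _ _
  unfold Spec_possible
  exact pv_main arr mid m k
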